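-- pv_equiv track=rewrite | github.com/saumyagupta09/GPRC6A | R1/scripts/screen_selection_candidates.py | codonwise_mask
-- ===== SOURCE A (Python) =====
-- def codonwise_mask(seqs):
--     names = list(seqs.keys())
--     L = len(next(iter(seqs.values())))
--     if L % 3 != 0:
--         L -= (L % 3)
--         seqs = {k: v[:L] for k, v in seqs.items()}
--     ncod = L // 3
--     keep = [True]*ncod
--     for j in range(ncod):
--         for nm in names:
--             codon = seqs[nm][3*j:3*j+3]
--             if any(ch in "-?" for ch in codon) or len(codon) < 3:
--                 keep[j] = False; break
--     if not any(keep): raise RuntimeError("All codons masked.")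
--     kept_idx = [j for j,k in enumerate(keep) if k]
--     trimmed = {}
--     for nm in names:
--         s = []
--         for j in kept_idx:
--             s.append(seqs[nm][3*j:3*j+3])
--         trimmed[nm] = "".join(s)
--     return trimmed
-- ===== SOURCE B (Python) =====
-- def codonwise_mask(seqs):
--     # One pass per sequence building a set of masked codon indices, then one
--     # reconstruction pass over the kept indices (simpler than per-codon scans).
--     ncod = len(next(iter(seqs.values()))) // 3
--     masked = set()
--     for s in seqs.values():
--         for j in range(min(len(s) // 3, ncod), ncod):
--             masked.add(j)
--         for pos, ch in enumerate(s[:3 * ncod]):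
--             if ch in "-?":
--                 masked.add(pos // 3)
--     kept = [j for j in range(ncod) if j not in masked]
--     if not kept:
--         raise RuntimeError("All codons masked.")
--     return {nm: "".join(s[3 * j:3 * j + 3] for j in kept) for nm, s in seqs.items()}
-- ===== Notes on version B (the rewrite author's own statement) =====
-- stated objective: alternative
-- what changed: Replaces the per-codon loop over all sequences (with early break) and the truncated-dict rebuild by one pass per sequence that collects a set of masked codon indices (gap positions and short/partial trailing codons), then filters the index range once and rebuilds directly from the original strings.
import Mathlib
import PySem

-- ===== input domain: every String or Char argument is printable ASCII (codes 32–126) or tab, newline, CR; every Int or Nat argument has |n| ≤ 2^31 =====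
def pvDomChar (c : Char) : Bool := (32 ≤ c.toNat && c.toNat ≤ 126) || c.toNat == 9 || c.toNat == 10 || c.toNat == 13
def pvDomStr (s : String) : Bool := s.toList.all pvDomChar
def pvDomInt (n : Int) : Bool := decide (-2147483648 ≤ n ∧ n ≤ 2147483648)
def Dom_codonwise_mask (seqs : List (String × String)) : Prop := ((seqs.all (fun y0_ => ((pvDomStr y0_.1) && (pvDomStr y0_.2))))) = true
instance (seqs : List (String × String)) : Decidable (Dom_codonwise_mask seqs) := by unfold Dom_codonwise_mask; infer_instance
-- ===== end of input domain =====

-- B replaces A's per-codon scan over all sequences by one pass per sequence that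
-- collects a set of masked codon indices, then one filter + one rebuild pass
-- (objective: alternative structure, same asymptotic cost).

-- ch in "-?"
def pvGap (c : Char) : Bool := c == '-' || c == '?'

-- ===== PORT A =====
def codonwise_mask (seqs : List (String × String)) : List (String × String) :=
  let d := PySem.Dict.ofList seqs
  let names := d.keys
  match d.values with
  | [] => []  -- Python: next(iter(...)) raises StopIteration; excluded by Pre_
  | v0 :: _ =>
    let L0 : Int := PySem.Str.len v0
    let L : Int := if PySem.Int.mod L0 3 ≠ 0 then L0 - PySem.Int.mod L0 3 else L0
    let d1 := if PySem.Int.mod L0 3 ≠ 0 then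
        PySem.Dict.mk (d.items.map (fun p => (p.1, PySem.Str.slice p.2 none (some L))))
      else d
    let ncod : Int := PySem.Int.floordiv L 3
    -- keep[j] = False exactly when the inner loop over names breaks at some bad codon
    let keep : List Bool := (PySem.List.pyRange 0 ncod 1).map (fun j =>
      ! names.any (fun nm =>
        let codon := (PySem.Str.slice (d1.getD nm "") (some (3*j)) (some (3*j+3))).toList
        codon.any pvGap || decide (codon.length < 3)))
    if keep.any id then
      let kept_idx : List Int := (PySem.List.enumerate keep).filterMap
        (fun p => if p.2 then some p.1 else none)
      let trimmed := names.foldl (fun acc nm =>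
        acc.insert nm (PySem.Str.join ""
          (kept_idx.map (fun j => PySem.Str.slice (d1.getD nm "") (some (3*j)) (some (3*j+3))))))
        PySem.Dict.empty
      trimmed.items
    else []  -- Python: raise RuntimeError("All codons masked."); excluded by Pre_

-- ===== PORT B =====
def codonwise_mask_alt (seqs : List (String × String)) : List (String × String) :=
  let d := PySem.Dict.ofList seqs
  match d.values with
  | [] => []  -- StopIteration; excluded by Pre_
  | v0 :: _ =>
    let ncod : Int := PySem.Int.floordiv (PySem.Str.len v0) 3
    let masked : PySem.Set Int := d.values.foldl (fun m s =>
      let m1 := (PySem.List.pyRange (min (PySem.Int.floordiv (PySem.Str.len s) 3) ncod) ncod).foldl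
        (fun m j => PySem.Set.add m j) m
      (PySem.List.enumerate (PySem.Str.slice s none (some (3*ncod))).toList).foldl
        (fun m pc => if pvGap pc.2 then PySem.Set.add m (PySem.Int.floordiv pc.1 3) else m) m1)
      (PySem.Set.ofList [])
    let kept : List Int := (PySem.List.pyRange 0 ncod).filter (fun j => ! masked.contains j)
    if kept = [] then []  -- RuntimeError; excluded by Pre_
    else d.items.map (fun p =>
      (p.1, PySem.Str.join "" (kept.map (fun j => PySem.Str.slice p.2 (some (3*j)) (some (3*j+3))))))

-- ===== PRECONDITION & SPEC =====
-- codon j of string s is fully present and free of '-'/'?'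
def pvGoodCodon (s : String) (j : Nat) : Bool :=
  decide (3*j+3 ≤ s.toList.length) && ((s.toList.drop (3*j)).take 3).all (fun c => !pvGap c)

-- Pre_ excludes exactly the inputs where the Python A raises: the empty dict
-- (StopIteration) and inputs where every codon column is masked (RuntimeError).
def Pre_codonwise_mask (seqs : List (String × String)) : Prop :=
  seqs ≠ [] ∧ ∃ j < ((PySem.Dict.ofList seqs).values.headD "").toList.length / 3,
    ((PySem.Dict.ofList seqs).items.all (fun p => pvGoodCodon p.2 j)) = true
instance (seqs : List (String × String)) : Decidable (Pre_codonwise_mask seqs) := by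
  unfold Pre_codonwise_mask; infer_instance

def pvWitness_codonwise_mask : (List (String × String)) := [("a", "AC-GGT"), ("b", "ACAGGA")]

def Spec_codonwise_mask (seqs : List (String × String)) (out : List (String × String)) : Prop := out = codonwise_mask_alt seqs
instance (seqs : List (String × String)) (out : List (String × String)) : Decidable (Spec_codonwise_mask seqs out) := by unfold Spec_codonwise_mask; infer_instance

-- ===== CLAIM (what is proved, stated in full; the proofs are below) =====
def Claim_equal_codonwise_mask : Prop := ∀ (seqs : List (String × String)), Dom_codonwise_mask seqs → Pre_codonwise_mask seqs → Spec_codonwise_mask seqs (codonwise_mask seqs)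


set_option maxRecDepth 4000 in
theorem codonwise_mask_witness_ok :
    Dom_codonwise_mask pvWitness_codonwise_mask ∧ Pre_codonwise_mask pvWitness_codonwise_mask := by
  decide


-- ===== LEMMAS AND PROOFS =====

theorem pv_window_iff (l : List Char) (k : Nat) :
    (∃ c ∈ (l.drop (3*k)).take 3, pvGap c = true)
      ↔ ∃ i, ∃ _h : i < l.length, 3*k ≤ i ∧ i < 3*k+3 ∧ pvGap l[i] = true := by
  constructor
  · rintro ⟨c, hc, hg⟩
    obtain ⟨j, hj, rfl⟩ := List.mem_iff_getElem.mp hc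
    have hj' : j < 3 ∧ 3*k + j < l.length := by
      have := hj; simp [List.length_take, List.length_drop] at this; omega
    refine ⟨3*k+j, hj'.2, by omega, by omega, ?_⟩
    simpa [List.getElem_take, List.getElem_drop] using hg
  · rintro ⟨i, hi, h1, h2, hg⟩
    refine ⟨l[i], ?_, hg⟩
    have hlt : i - 3*k < (( l.drop (3*k)).take 3).length := by
      simp [List.length_take, List.length_drop]; omega
    refine List.mem_iff_getElem.mpr ⟨i - 3*k, hlt, ?_⟩
    simp [List.getElem_take, List.getElem_drop]
    congr 1
    omega

theorem pv_good_false_iff (v : String) (k : Nat) :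
    pvGoodCodon v k = false
      ↔ (¬ 3*k+3 ≤ v.toList.length) ∨ ∃ i, ∃ _h : i < v.toList.length, 3*k ≤ i ∧ i < 3*k+3 ∧ pvGap v.toList[i] = true := by
  rw [← pv_window_iff]
  have hL : v.toList.length = v.length := String.length_toList
  by_cases hlen : 3*k+3 ≤ v.length
  · simp [pvGoodCodon, hL, hlen]
  · simp [pvGoodCodon, hL, hlen]

theorem pv_mod3 (m : Nat) : PySem.Int.mod (m:Int) 3 = ((m % 3 : Nat) : Int) := by
  exact_mod_cast PySem.Int.mod_natCast m 3

theorem pv_div3 (m : Nat) : PySem.Int.floordiv (m:Int) 3 = ((m / 3 : Nat) : Int) := by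
  exact_mod_cast PySem.Int.floordiv_natCast m 3

theorem pv_bad_iff (v : String) (N k : Nat) (hk : k < N) :
    ((↑k : Int) ∈ PySem.List.pyRange (min ↑(v.toList.length/3) ↑N) ↑N ∨
      ∃ pc ∈ PySem.List.enumerate (PySem.Str.slice v none (some (3 * (N:Int)))).toList,
        pvGap pc.2 = true ∧ (↑k:Int) = PySem.Int.floordiv pc.1 3)
      ↔ pvGoodCodon v k = false := by
  have hL : v.toList.length = v.length := String.length_toList
  have hsl : (PySem.Str.slice v none (some (3 * (N:Int)))).toList = v.toList.take (3*N) := by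
    rw [show (3 * (N:Int)) = ((3*N : Nat) : Int) by push_cast; ring]
    rw [PySem.Str.toList_slice, PySem.Chars.slice_eq_listSlice, PySem.List.slice_to_natCast]
  rw [hsl, pv_good_false_iff, PySem.List.mem_pyRange_one]
  constructor
  · rintro (⟨h1, h2⟩ | ⟨⟨i, c⟩, hmem, hg, hi⟩)
    · left
      have : min (v.toList.length/3) N ≤ k := by exact_mod_cast h1
      omega
    · right
      obtain ⟨j, hj, hpc⟩ := (PySem.List.mem_enumerate_iff _ _ _).mp hmem
      obtain ⟨hi', hc⟩ := Prod.mk.injEq .. ▸ hpc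
      have hjlen : j < v.toList.length := by
        have := hj; simp [List.length_take] at this; omega
      have hkj : k = j / 3 := by
        have : (↑k : Int) = ((j/3 : Nat) : Int) := by
          rw [hi, hi']; simp
        exact_mod_cast this
      refine ⟨j, hjlen, by omega, by omega, ?_⟩
      rw [hc] at hg
      simpa [List.getElem_take] using hg
  · rintro (h | ⟨i, hi, h1, h2, hg⟩)
    · left
      constructor
      · have hmin : min (v.toList.length/3) N ≤ k := by omega
        exact_mod_cast hmin
      · exact_mod_cast hk
    · right
      have hilen : i < (v.toList.take (3*N)).length := by
        simp [List.length_take]; omega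
      refine ⟨((i:Int), (v.toList.take (3*N))[i]), (PySem.List.mem_enumerate_iff _ _ _).mpr ⟨i, hilen, by simp⟩, ?_, ?_⟩
      · simpa [List.getElem_take] using hg
      · rw [pv_div3]
        have : k = i / 3 := by omega
        exact_mod_cast this

theorem pv_badA_eq_not_good (s : String) (k : Nat) :
    (((s.toList.drop (3*k)).take 3).any pvGap
      || decide (((s.toList.drop (3*k)).take 3).length < 3)) = !pvGoodCodon s k := by
  have hL : s.toList.length = s.length := String.length_toList
  unfold pvGoodCodon
  by_cases h : 3*k+3 ≤ s.length
  · have h3 : ((s.toList.drop (3*k)).take 3).length = 3 := by simp; omega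
    simp only [h3, List.all_eq_not_any_not, Bool.not_not, hL]
    simp [h]
  · have h3 : ((s.toList.drop (3*k)).take 3).length < 3 := by simp; omega
    simp only [hL]
    simp [h]
    exact Or.inr (by omega)

theorem pv_any_mem_congr {α : Type} (l : List α) (p q : α → Bool)
    (h : ∀ a ∈ l, p a = q a) : l.any p = l.any q := by
  induction l with
  | nil => rfl
  | cons a l ih => simp [List.any_cons, h a (by simp), ih (fun b hb => h b (by simp [hb]))]

theorem pv_codon_list (v : List Char) (k : Nat) :
    PySem.Chars.slice v (some (3*(k:Int))) (some (3*(k:Int)+3)) = (v.drop (3*k)).take 3 := by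
  rw [show (3*(k:Int)) = ((3*k : Nat) : Int) by push_cast; ring,
      show ((3*k:Nat):Int)+3 = (((3*k+3) : Nat) : Int) by push_cast; ring,
      PySem.Chars.slice_eq_listSlice, PySem.List.slice_natCast]
  congr 1
  omega

theorem pv_codon_toList (s : String) (k : Nat) :
    (PySem.Str.slice s (some (3*(k:Int))) (some (3*(k:Int)+3))).toList
      = (s.toList.drop (3*k)).take 3 := by
  rw [PySem.Str.toList_slice, pv_codon_list]

theorem pv_trunc_codon (s : String) (m k : Nat) (h : 3*k+3 ≤ m) :
    PySem.Str.slice (PySem.Str.slice s none (some (m:Int))) (some (3*(k:Int))) (some (3*(k:Int)+3))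
      = PySem.Str.slice s (some (3*(k:Int))) (some (3*(k:Int)+3)) := by
  show String.ofList _ = String.ofList _
  rw [pv_codon_list, PySem.Str.toList_slice, PySem.Chars.slice_eq_listSlice,
    PySem.List.slice_to_natCast, pv_codon_list]
  rw [List.drop_take, List.take_take]
  congr 2
  omega

-- Bool de Morgan for the gap scan
theorem pv_mem_foldl_iff {β : Type} (step : PySem.Set Int → β → PySem.Set Int)
    (Q : β → Int → Prop) (h : ∀ m b x, x ∈ step m b ↔ x ∈ m ∨ Q b x)
    (l : List β) (m : PySem.Set Int) (x : Int) :
    x ∈ l.foldl step m ↔ x ∈ m ∨ ∃ b ∈ l, Q b x := by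
  induction l generalizing m with
  | nil => simp
  | cons b l ih => rw [List.foldl_cons, ih]; simp [h]; tauto

theorem pv_mem_foldl_add_if {β : Type} (l : List β) (p : β → Bool) (f : β → Int)
    (m : PySem.Set Int) (x : Int) :
    x ∈ l.foldl (fun m b => if p b then PySem.Set.add m (f b) else m) m
      ↔ x ∈ m ∨ ∃ b ∈ l, p b = true ∧ x = f b := by
  induction l generalizing m with
  | nil => simp
  | cons b l ih =>
    rw [List.foldl_cons]
    by_cases hp : p b = true
    · rw [if_pos hp, ih]
      simp [hp, PySem.Set.mem_add]; tauto
    · rw [if_neg hp, ih]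
      simp [hp]

theorem pv_filterMap_if {α β : Type} (l : List α) (G : α → Bool) (h : α → β) :
    l.filterMap (fun k => if G k then some (h k) else none) = (l.filter G).map h := by
  induction l with
  | nil => rfl
  | cons a l ih =>
    by_cases hg : G a = true <;> simp [hg, ih]

theorem pv_core (seqs : List (String × String)) (d1 : PySem.Dict String String)
    (v0 : String) (vs : List String) (N : Nat)
    (hv : (PySem.Dict.ofList seqs).values = v0 :: vs)
    (hc : ∀ nm ∈ (PySem.Dict.ofList seqs).keys, ∀ k : Nat, k < N →
      PySem.Str.slice (d1.getD nm "") (some (3*(k:Int))) (some (3*(k:Int)+3))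
        = PySem.Str.slice ((PySem.Dict.ofList seqs).getD nm "") (some (3*(k:Int))) (some (3*(k:Int)+3))) :
    (if
        (List.map
                (fun j =>
                  !(PySem.Dict.ofList seqs).keys.any fun nm =>
                      (PySem.Str.slice (d1.getD nm "") (some (3 * j))
                                (some (3 * j + 3))).toList.any
                          pvGap ||
                        decide
                          ((PySem.Str.slice (d1.getD nm "") (some (3 * j))
                                  (some (3 * j + 3))).toList.length <
                            3))
                (PySem.List.pyRange 0 (N:Int))).any
            id =
          true then
      (List.foldl
          (fun acc nm =>
            acc.insert nm
              (PySem.Str.join ""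
                (List.map
                  (fun j => PySem.Str.slice (d1.getD nm "") (some (3 * j)) (some (3 * j + 3)))
                  (List.filterMap (fun p => if p.2 = true then some p.1 else none)
                    (PySem.List.enumerate
                      (List.map
                        (fun j =>
                          !(PySem.Dict.ofList seqs).keys.any fun nm =>
                              (PySem.Str.slice (d1.getD nm "") (some (3 * j))
                                        (some (3 * j + 3))).toList.any
                                  pvGap ||
                                decide
                                  ((PySem.Str.slice (d1.getD nm "") (some (3 * j))
                                          (some (3 * j + 3))).toList.length <
                                    3))
                        (PySem.List.pyRange 0 (N:Int))))))))
          PySem.Dict.empty (PySem.Dict.ofList seqs).keys).items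
    else []) =
    if
        List.filter
            (fun j =>
              !(List.foldl
                      (fun m s =>
                        List.foldl (fun m pc => if pvGap pc.2 = true then m.add (PySem.Int.floordiv pc.1 3) else m)
                          (List.foldl (fun m j => m.add j) m
                            (PySem.List.pyRange (min ((s.toList.length / 3 : Nat) : Int) (N:Int))
                              (N:Int)))
                          (PySem.List.enumerate (PySem.Str.slice s none (some (3 * (N:Int)))).toList))
                      (PySem.Set.ofList []) (v0 :: vs)).contains
                  j)
            (PySem.List.pyRange 0 (N:Int)) =
          [] then
      []
    else
      List.map
        (fun p =>
          (p.1,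
            PySem.Str.join ""
              (List.map (fun j => PySem.Str.slice p.2 (some (3 * j)) (some (3 * j + 3)))
                (List.filter
                  (fun j =>
                    !(List.foldl
                            (fun m s =>
                              List.foldl
                                (fun m pc => if pvGap pc.2 = true then m.add (PySem.Int.floordiv pc.1 3) else m)
                                (List.foldl (fun m j => m.add j) m
                                  (PySem.List.pyRange (min ((s.toList.length / 3 : Nat) : Int) (N:Int))
                                    (N:Int)))
                                (PySem.List.enumerate
                                  (PySem.Str.slice s none (some (3 * (N:Int)))).toList))
                            (PySem.Set.ofList []) (v0 :: vs)).contains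
                        j)
                  (PySem.List.pyRange 0 (N:Int))))))
        (PySem.Dict.ofList seqs).items := by
  have hnd : (PySem.Dict.ofList seqs).keys.Nodup := PySem.Dict.nodup_keys_ofList seqs
  set d := PySem.Dict.ofList seqs with hd
  set G : Nat → Bool := fun k => (v0 :: vs).all (fun v => pvGoodCodon v k) with hG
  have hvk : d.keys.map (fun nm => d.getD nm "") = v0 :: vs := by
    rw [← PySem.Dict.values_eq_map_keys d hnd ""]; exact hv
  -- Step 1: A's keep list
  have hkeep : (List.map
                (fun j =>
                  !d.keys.any fun nm =>
                      (PySem.Str.slice (d1.getD nm "") (some (3 * j))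
                                (some (3 * j + 3))).toList.any
                          pvGap ||
                        decide
                          ((PySem.Str.slice (d1.getD nm "") (some (3 * j))
                                  (some (3 * j + 3))).toList.length <
                            3))
                (PySem.List.pyRange 0 (N:Int))) = (List.range N).map G := by
    rw [PySem.List.pyRange_zero_natCast, List.map_map]
    apply List.map_congr_left
    intro k hk
    have hkN : k < N := List.mem_range.mp hk
    simp only [Function.comp]
    rw [pv_any_mem_congr _ _ (fun nm => !pvGoodCodon (d.getD nm "") k)
      (fun nm hm => by
        rw [hc nm hm k hkN, pv_codon_toList]
        exact pv_badA_eq_not_good _ k)]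
    simp only [hG, ← hvk, List.all_eq_not_any_not]
    rw [List.any_map]
    simp only [Function.comp_def]
  -- Step 2: B's masked set, on indices below N
  have hmasked : ∀ k : Nat, k < N →
      ((List.foldl
        (fun m s =>
          List.foldl (fun m pc => if pvGap pc.2 = true then m.add (PySem.Int.floordiv pc.1 3) else m)
            (List.foldl (fun m j => m.add j) m
              (PySem.List.pyRange (min ((s.toList.length / 3 : Nat) : Int) (N:Int)) (N:Int)))
            (PySem.List.enumerate (PySem.Str.slice s none (some (3 * (N:Int)))).toList))
        (PySem.Set.ofList []) (v0 :: vs)).contains ((k:Int))) = !G k := by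
    intro k hkN
    have hstep : ∀ (m : PySem.Set Int) (s : String) (x : Int),
        x ∈ (fun (m : PySem.Set Int) (s : String) =>
          List.foldl (fun m pc => if pvGap pc.2 = true then m.add (PySem.Int.floordiv pc.1 3) else m)
            (List.foldl (fun m j => m.add j) m
              (PySem.List.pyRange (min ((s.toList.length / 3 : Nat) : Int) (N:Int)) (N:Int)))
            (PySem.List.enumerate (PySem.Str.slice s none (some (3 * (N:Int)))).toList)) m s
        ↔ x ∈ m ∨ (x ∈ PySem.List.pyRange (min ((s.toList.length / 3 : Nat) : Int) (N:Int)) (N:Int) ∨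
            ∃ pc ∈ PySem.List.enumerate (PySem.Str.slice s none (some (3 * (N:Int)))).toList,
              pvGap pc.2 = true ∧ x = PySem.Int.floordiv pc.1 3) := by
      intro m s x
      simp only []
      rw [pv_mem_foldl_add_if]
      rw [show (fun (m : PySem.Set Int) (j : Int) => m.add j) = (fun (m : PySem.Set Int) (j : Int) => m.add ((fun y => y) j)) from rfl,
        PySem.Set.mem_foldl_add]
      constructor
      · rintro ((h | ⟨b, hb, rfl⟩) | ⟨pc, hpc, hg, hx⟩)
        · exact Or.inl h
        · exact Or.inr (Or.inl hb)
        · exact Or.inr (Or.inr ⟨pc, hpc, hg, hx⟩)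
      · rintro (h | (hb | ⟨pc, hpc, hg, hx⟩))
        · exact Or.inl (Or.inl h)
        · exact Or.inl (Or.inr ⟨x, hb, rfl⟩)
        · exact Or.inr ⟨pc, hpc, hg, hx⟩
    rw [Bool.eq_iff_iff, PySem.Set.contains_iff, pv_mem_foldl_iff _ _ hstep]
    constructor
    · rintro (h | ⟨s, hs, hQ⟩)
      · simp at h
      · have hgf := (pv_bad_iff s N k hkN).mp hQ
        simp only [hG, Bool.not_eq_true', List.all_eq_false]
        exact ⟨s, hs, by simp [hgf]⟩
    · intro h
      have hGf : G k = false := by simpa using h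
      rw [hG] at hGf
      obtain ⟨s, hs, hgf⟩ := List.all_eq_false.mp hGf
      exact Or.inr ⟨s, hs, (pv_bad_iff s N k hkN).mpr (by simpa using hgf)⟩
  -- Step 3: both kept-index lists are the filtered range
  have hkidx : (List.filterMap (fun p => if p.2 = true then some p.1 else none)
      (PySem.List.enumerate ((List.range N).map G))) = ((List.range N).filter G).map (fun k : Nat => (k : Int)) := by
    rw [PySem.List.enumerate_eq_map_pyRange _ false, List.filterMap_map]
    have hlen : PySem.List.len ((List.range N).map G) = (N:Int) := by
      simp [PySem.List.len_eq]
    rw [hlen, PySem.List.pyRange_zero_natCast, List.filterMap_map]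
    rw [List.filterMap_congr (g := fun k : Nat => if G k then some ((k : Int)) else none)
      (fun k hk => by
        simp only [Function.comp_def, PySem.List.pyGetD_natCast,
          PySem.List.getD_map_range _ _ _ _ (List.mem_range.mp hk)])]
    exact pv_filterMap_if _ _ _
  have hkB : (List.filter (fun j => !((List.foldl
        (fun m s =>
          List.foldl (fun m pc => if pvGap pc.2 = true then m.add (PySem.Int.floordiv pc.1 3) else m)
            (List.foldl (fun m j => m.add j) m
              (PySem.List.pyRange (min ((s.toList.length / 3 : Nat) : Int) (N:Int)) (N:Int)))
            (PySem.List.enumerate (PySem.Str.slice s none (some (3 * (N:Int)))).toList))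
        (PySem.Set.ofList []) (v0 :: vs))).contains j) (PySem.List.pyRange 0 (N:Int)))
      = ((List.range N).filter G).map (fun k : Nat => (k : Int)) := by
    rw [PySem.List.pyRange_zero_natCast, List.filter_map]
    rw [List.filter_congr (q := fun k : Nat => G k)
      (fun k hk => by
        simp only [Function.comp_def]
        rw [hmasked k (List.mem_range.mp hk), Bool.not_not])]
  -- Step 4: assemble
  rw [hkeep, hkidx, hkB]
  by_cases hfil : (List.range N).filter G = []
  · have hany : ((List.range N).map G).any id = false := by
      simp only [List.any_map, List.any_eq_false]
      intro x hx
      have := List.filter_eq_nil_iff.mp hfil x hx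
      simp [this]
    simp [hany, hfil]
  · have hany : ((List.range N).map G).any id = true := by
      obtain ⟨x, hx⟩ := List.exists_mem_of_ne_nil _ hfil
      obtain ⟨hxr, hxg⟩ := List.mem_filter.mp hx
      simp only [List.any_map, List.any_eq_true]
      exact ⟨x, hxr, by simp [hxg]⟩
    have hKK : ((List.range N).filter G).map (fun k : Nat => (k : Int)) ≠ [] := by
      simp [hfil]
    rw [if_pos hany, if_neg hKK]
    rw [PySem.Dict.items_foldl_insert_fresh d.keys (fun nm => nm) _ PySem.Dict.empty
      (fun a _ => PySem.Dict.contains_empty a) (by simpa using hnd)]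
    rw [PySem.Dict.items_eq_map_keys d hnd "", List.map_map]
    simp only [PySem.Dict.empty, List.nil_append]
    apply List.map_congr_left
    intro nm hm
    simp only [Function.comp_def]
    refine congrArg (fun s => (nm, s)) ?_
    refine congrArg (PySem.Str.join "") ?_
    apply List.map_congr_left
    intro j hj
    obtain ⟨k, hkf, rfl⟩ := List.mem_map.mp hj
    exact hc nm hm k (List.mem_range.mp (List.mem_filter.mp hkf).1)

-- ===== VERDICT (by name: the statement is the Claim_ definition above) =====
theorem codonwise_mask_spec : Claim_equal_codonwise_mask := by
  intro seqs _ _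
  unfold Spec_codonwise_mask
  simp only [codonwise_mask, codonwise_mask_alt]
  cases hv : (PySem.Dict.ofList seqs).values with
  | nil => rfl
  | cons v0 vs =>
    have hnd : (PySem.Dict.ofList seqs).keys.Nodup := PySem.Dict.nodup_keys_ofList seqs
    simp only [PySem.Str.len_eq, pv_mod3]
    by_cases h3 : v0.toList.length % 3 = 0
    · simp only [h3, Nat.cast_zero, ne_eq, not_true, if_false, pv_div3]
      exact pv_core seqs (PySem.Dict.ofList seqs) v0 vs (v0.toList.length / 3) hv
        (fun nm _ k _ => rfl)
    · have hc0 : ((v0.toList.length % 3 : Nat) : Int) ≠ 0 := by exact_mod_cast h3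
      simp only [ne_eq, hc0, not_false_eq_true, if_true]
      rw [show ((v0.toList.length : Int) - ((v0.toList.length % 3 : Nat) : Int))
            = ((3*(v0.toList.length/3) : Nat) : Int) from by push_cast; omega]
      simp only [pv_div3]
      rw [show 3*(v0.toList.length/3)/3 = v0.toList.length/3 from by omega]
      refine pv_core seqs _ v0 vs (v0.toList.length / 3) hv ?_
      intro nm hm k hk
      have hmem : (nm, (PySem.Dict.ofList seqs).getD nm "") ∈ (PySem.Dict.ofList seqs).items := by
        rw [PySem.Dict.items_eq_map_keys _ hnd ""]
        exact List.mem_map.mpr ⟨nm, hm, rfl⟩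
      have hnd1 : (PySem.Dict.mk ((PySem.Dict.ofList seqs).items.map
          (fun p => (p.1, PySem.Str.slice p.2 none (some ((3*(v0.toList.length/3) : Nat) : Int)))))).keys.Nodup := by
        show ((PySem.Dict.ofList seqs).items.map _).map _ |>.Nodup
        rw [List.map_map]
        exact hnd
      have hmem1 : (nm, PySem.Str.slice ((PySem.Dict.ofList seqs).getD nm "") none (some ((3*(v0.toList.length/3) : Nat) : Int)))
          ∈ ((PySem.Dict.ofList seqs).items.map
            (fun p => (p.1, PySem.Str.slice p.2 none (some ((3*(v0.toList.length/3) : Nat) : Int))))) :=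
        List.mem_map.mpr ⟨_, hmem, rfl⟩
      have hget1 : (PySem.Dict.mk ((PySem.Dict.ofList seqs).items.map
          (fun p => (p.1, PySem.Str.slice p.2 none (some ((3*(v0.toList.length/3) : Nat) : Int)))))).getD nm ""
            = PySem.Str.slice ((PySem.Dict.ofList seqs).getD nm "") none (some ((3*(v0.toList.length/3) : Nat) : Int)) :=
        PySem.Dict.getD_of_mem_items _ hmem1 hnd1 ""
      rw [hget1]
      exact pv_trunc_codon _ _ k (by omega)
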